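-- pv_equiv track=rewrite | github.com/saajiidi/Order-Process-Automation | BackEnd/utils/data.py | extract_best_zone
-- ===== SOURCE A (Python) =====
-- def extract_best_zone(address, KNOWN_ZONES):
--     if not isinstance(address, str) or not address:
--         return ""
--     addr_l = address.lower()
--     matches = [z for z in KNOWN_ZONES if z.lower() in addr_l]
--     if not matches:
--         return ""
--     matches.sort(key=len, reverse=True)
--     return matches[0]
-- ===== SOURCE B (Python) =====
-- def extract_best_zone(address, KNOWN_ZONES):
--     if not isinstance(address, str):
--         return ""
--     addr_l = address.lower()
--     best, best_len = "", -1
--     for z in KNOWN_ZONES: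
--         if len(z) > best_len and z.lower() in addr_l:
--             best, best_len = z, len(z)
--     return best
-- ===== Notes on version B (the rewrite author's own statement) =====
-- stated objective: simpler
-- what changed: Replaced the filter-comprehension + stable descending sort + index-0 with a single left-to-right pass that keeps the current best match; strict > keeps the earliest zone on length ties, best="" covers the empty/no-match cases, and the short-circuit 'len(z) > best_len and ...' skips the lowercase+substring test for zones no longer than the current best.
import Mathlib
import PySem

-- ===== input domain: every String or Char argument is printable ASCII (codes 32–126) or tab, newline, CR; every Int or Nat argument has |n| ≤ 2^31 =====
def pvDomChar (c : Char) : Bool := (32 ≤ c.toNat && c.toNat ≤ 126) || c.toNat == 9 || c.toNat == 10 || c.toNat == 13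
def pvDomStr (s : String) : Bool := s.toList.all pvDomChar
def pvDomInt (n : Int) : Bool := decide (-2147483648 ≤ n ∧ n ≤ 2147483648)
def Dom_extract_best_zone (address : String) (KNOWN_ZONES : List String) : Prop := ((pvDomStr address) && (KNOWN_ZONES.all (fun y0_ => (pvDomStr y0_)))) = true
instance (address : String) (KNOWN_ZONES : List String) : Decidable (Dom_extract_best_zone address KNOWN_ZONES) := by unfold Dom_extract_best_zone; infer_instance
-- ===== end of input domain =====

-- B replaces A's filter + stable descending sort + index-0 by one pass keeping the best match so far (simpler, no sort).


-- ===== PORT A =====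
-- (isinstance(address, str) is always true under the type convention, so only the emptiness guard remains)
def extract_best_zone (address : String) (KNOWN_ZONES : List String) : String :=
  if address = "" then ""
  else
    let addr_l := PySem.Str.lower address
    let ms := KNOWN_ZONES.filter (fun z => PySem.Str.isIn (PySem.Str.lower z) addr_l)
    if ms = [] then ""
    else
      -- matches.sort(key=len, reverse=True); return matches[0]  (ms ≠ [] is guarded just above,
      -- so the default "" of headD is unreachable)
      (PySem.List.sorted ms (fun z => PySem.Str.len z) true).headD ""

-- ===== PORT B =====
-- (isinstance(address, str) is always true under the type convention)
def extract_best_zone_alt (address : String) (KNOWN_ZONES : List String) : String :=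
  let addr_l := PySem.Str.lower address
  (KNOWN_ZONES.foldl
    (fun (st : String × Int) z =>
      if decide (st.2 < PySem.Str.len z) && PySem.Str.isIn (PySem.Str.lower z) addr_l
      then (z, PySem.Str.len z) else st)
    ("", -1)).1

-- ===== PRECONDITION & SPEC =====
def Spec_extract_best_zone (address : String) (KNOWN_ZONES : List String) (out : String) : Prop := out = extract_best_zone_alt address KNOWN_ZONES
instance (address : String) (KNOWN_ZONES : List String) (out : String) : Decidable (Spec_extract_best_zone address KNOWN_ZONES out) := by unfold Spec_extract_best_zone; infer_instance

-- ===== CLAIM (what is proved, stated in full; the proofs are below) =====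
def Claim_equal_extract_best_zone : Prop := ∀ (address : String) (KNOWN_ZONES : List String), Dom_extract_best_zone address KNOWN_ZONES → Spec_extract_best_zone address KNOWN_ZONES (extract_best_zone address KNOWN_ZONES)

-- ===== LEMMAS AND PROOFS =====

-- B's step once the substring test has been factored out by filtering.
def pvStep (st : String × Int) (z : String) : String × Int :=
  if st.2 < PySem.Str.len z then (z, PySem.Str.len z) else st

-- A's insertion step (what PySem.List.sorted with reverse=True folds, by sorted_rev_eq_foldl_insertBy).
def pvIns (acc : List String) (x : String) : List String :=
  PySem.List.insertBy (fun a b => decide (PySem.Str.len b < PySem.Str.len a)) x acc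

-- B's fold over the whole list equals the pure max-fold over the filtered list.
theorem foldl_step_filter (p : String → Bool) (xs : List String) (st : String × Int) :
    xs.foldl (fun st z => if decide (st.2 < PySem.Str.len z) && p z
        then (z, PySem.Str.len z) else st) st
      = (xs.filter p).foldl pvStep st := by
  induction xs generalizing st with
  | nil => rfl
  | cons x xs ih =>
    by_cases hp : p x = true
    · rw [List.foldl_cons, ih, List.filter_cons_of_pos hp, List.foldl_cons]
      congr 1
      simp [pvStep, hp]
    · rw [List.foldl_cons, ih, List.filter_cons_of_neg hp]
      congr 1
      simp [hp]

-- Invariant: the head of A's insertion-sort accumulator is B's running best.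
theorem fold_head_inv (rest : List String) (a : String) (acc : List String) :
    ∃ t, rest.foldl pvIns (a :: acc)
      = (rest.foldl pvStep (a, PySem.Str.len a)).1 :: t := by
  induction rest generalizing a acc with
  | nil => exact ⟨acc, rfl⟩
  | cons x rest ih =>
    rw [List.foldl_cons, List.foldl_cons]
    by_cases h : PySem.Str.len a < PySem.Str.len x
    · have h' : a.length < x.length := by
        rw [PySem.Str.len_eq, PySem.Str.len_eq] at h; simpa using h
      have h1 : pvIns (a :: acc) x = x :: a :: acc := by
        simp [pvIns, PySem.List.insertBy, h']
      have h2 : pvStep (a, PySem.Str.len a) x = (x, PySem.Str.len x) := by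
        unfold pvStep; rw [if_pos h]
      rw [h1, h2]
      exact ih x (a :: acc)
    · have h' : ¬ a.length < x.length := by
        rw [PySem.Str.len_eq, PySem.Str.len_eq] at h; simpa using h
      have h1 : pvIns (a :: acc) x
          = a :: PySem.List.insertBy (fun a b => decide (PySem.Str.len b < PySem.Str.len a)) x acc := by
        simp [pvIns, PySem.List.insertBy, h']
      have h2 : pvStep (a, PySem.Str.len a) x = (a, PySem.Str.len a) := by
        unfold pvStep; rw [if_neg h]
      rw [h1, h2]
      exact ih a _

-- Characterisation of B's fold: it is the head of A's reverse-sorted filtered list.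
theorem fold_eq_sorted_head (p : String → Bool) (xs : List String) :
    (xs.foldl (fun st z => if decide (st.2 < PySem.Str.len z) && p z
        then (z, PySem.Str.len z) else st) ("", -1)).1
      = (PySem.List.sorted (xs.filter p) (fun z => PySem.Str.len z) true).headD "" := by
  rw [foldl_step_filter]
  rw [PySem.List.sorted_rev_eq_foldl_insertBy]
  cases hms : xs.filter p with
  | nil => rfl
  | cons z rest =>
    have h0 : pvStep ("", -1) z = (z, PySem.Str.len z) := by
      unfold pvStep
      rw [if_pos]
      rw [PySem.Str.len_eq]
      omega
    obtain ⟨t, ht⟩ := fold_head_inv rest z []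
    rw [List.foldl_cons, List.foldl_cons, h0]
    have hfun : (fun acc x => PySem.List.insertBy
        (fun a b => decide (PySem.Str.len b < PySem.Str.len a)) x acc) = pvIns := by
      funext acc x; rfl
    rw [hfun]
    have hins : PySem.List.insertBy
        (fun a b => decide (PySem.Str.len b < PySem.Str.len a)) z ([] : List String) = [z] := rfl
    rw [hins, ht]; rfl

theorem empty_match (z : String) (h : PySem.Str.isIn (PySem.Str.lower z) (PySem.Str.lower "") = true) :
    z = "" := by
  rw [PySem.Str.isIn_eq, PySem.Chars.isIn_iff_infix] at h
  have h0 : (PySem.Str.lower "").toList = [] := by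
    simp [PySem.Str.toList_lower, PySem.Chars.lower]
  rw [h0, List.infix_nil] at h
  rw [PySem.Str.toList_lower, PySem.Chars.lower] at h
  have hz : z.toList = [] := by
    have := congrArg List.length h
    simpa using this
  exact String.toList_eq_nil_iff.mp hz

-- A's guarded branches collapse to the sorted-head match (the guards only matter when every match is "").
theorem branches_eq (address : String) (ms : List String)
    (hemp : ∀ m ∈ ms, address = "" → m = "") :
    (if address = "" then "" else if ms = [] then ""
      else (PySem.List.sorted ms (fun z => PySem.Str.len z) true).headD "")
    = (PySem.List.sorted ms (fun z => PySem.Str.len z) true).headD "" := by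
  by_cases ha : address = ""
  · rw [if_pos ha]
    cases hs : PySem.List.sorted ms (fun z => PySem.Str.len z) true with
    | nil => rfl
    | cons m t =>
      have hm : m ∈ ms := by
        rw [← PySem.List.mem_sorted ms (fun z => PySem.Str.len z) true, hs]
        exact List.mem_cons_self
      exact (hemp m hm ha).symm
  · rw [if_neg ha]
    by_cases hn : ms = []
    · subst hn; rw [if_pos rfl]; rfl
    · rw [if_neg hn]

-- ===== VERDICT (by name: the statement is the Claim_ definition above) =====
set_option maxHeartbeats 1000000 in
theorem extract_best_zone_spec : Claim_equal_extract_best_zone := by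
  intro address KNOWN_ZONES _
  unfold Spec_extract_best_zone
  simp only [extract_best_zone, extract_best_zone_alt]
  rw [fold_eq_sorted_head (fun z => PySem.Str.isIn (PySem.Str.lower z) (PySem.Str.lower address)) KNOWN_ZONES]
  exact branches_eq address
    (KNOWN_ZONES.filter (fun z => PySem.Str.isIn (PySem.Str.lower z) (PySem.Str.lower address)))
    (by
      intro m hm he
      subst he
      exact empty_match m (List.mem_filter.mp hm).2)
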